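-- pv_equiv track=rewrite | github.com/NicaiseM/signal_processing | old/test0.py | devices_mark
-- ===== SOURCE A (Python) =====
-- def devices_check(devices, existing_devices):
--     '''
--     Получение списка приборов, файлы которых имеются в наличии
--
--     Parameters
--     ----------
--     devices : Массив названий приборов.
--     existing_devices : Массив названий приборов, созданные которыми файлы
--         присутствуют в рабочем каталоге (подкаталогах).
--
--     Returns
--     -------
--     devices_checked : Расположенный в заданном порядке список названий
--         приборов. При отсутствии файлов прибора вместо названия
--         значится None.
--
--     '''
--     devices_checked = devices[:]
--     for i, j in enumerate(devices_checked):
--         if j not in existing_devices: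
--             devices_checked[i] = None
--     return devices_checked
--
-- def devices_mark(devices, existing_devices):
--     '''
--     Получения списка обозначений наличия и отсутствия файлов приборов
--
--     Parameters
--     ----------
--     devices : Массив названий приборов.
--     existing_devices : Массив названий приборов, созданные которыми файлы
--         присутствуют в рабочем каталоге (подкаталогах).
--
--     Returns
--     -------
--     devices_checked : Cписок строк, где __1__ указывает на наличие
--     файлов, созданных соответствующим прибором, __0__ - на отсутствие.
--
--     '''
--     devices_checked = devices_check(devices, existing_devices)
--     for i, j in enumerate(devices_checked):
--         if j is not None:
--             devices_checked[i] = '__1__'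
--         else:
--             devices_checked[i] = '__0__'
--     return devices_checked
-- ===== SOURCE B (Python) =====
-- def devices_mark(devices, existing_devices):
--     return ['__1__' if d in existing_devices else '__0__' for d in devices]
-- ===== Notes on version B (the rewrite author's own statement) =====
-- stated objective: simpler
-- what changed: Replaces the two-stage decomposition (copy the list, overwrite absent devices with a None sentinel via devices_check, then a second index loop rewriting every slot in place) with a single pass over devices that directly emits '__1__'/'__0__' per membership test, with no intermediate list, sentinel or helper.
import Mathlib
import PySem

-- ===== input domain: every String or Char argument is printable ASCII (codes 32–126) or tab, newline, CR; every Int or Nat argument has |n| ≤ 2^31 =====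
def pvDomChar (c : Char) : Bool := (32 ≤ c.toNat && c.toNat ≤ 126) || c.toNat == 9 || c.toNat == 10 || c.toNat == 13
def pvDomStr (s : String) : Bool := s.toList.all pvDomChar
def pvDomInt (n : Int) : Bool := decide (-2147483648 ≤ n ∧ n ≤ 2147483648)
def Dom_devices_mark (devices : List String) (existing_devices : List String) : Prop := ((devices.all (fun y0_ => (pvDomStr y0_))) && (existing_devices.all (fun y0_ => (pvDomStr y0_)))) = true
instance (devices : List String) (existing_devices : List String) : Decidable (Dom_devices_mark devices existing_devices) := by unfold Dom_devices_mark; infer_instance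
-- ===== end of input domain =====

-- B replaces A's two-stage None-sentinel decomposition (devices_check + in-place rewrite loop)
-- with a single direct pass emitting '__1__'/'__0__' per membership test (objective: simpler).


-- ===== PORT A =====
-- devices_checked = devices[:] holds strings that may be overwritten by the None sentinel,
-- so the copy is typed List (Option String) (each element wrapped in `some`).
-- Python enumerates the list it is mutating, but slot i is read before it can be written,
-- so the element read at step i is the original devices[i]: enumerate runs over `devices`.
def devices_check (devices : List String) (existing_devices : List String) : List (Option String) :=
  let devices_checked : List (Option String) := devices.map some
  (PySem.List.enumerate devices 0).foldl
    (fun acc p => if p.2 ∉ existing_devices then PySem.List.pySetD acc p.1 none else acc)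
    devices_checked

-- The second loop overwrites EVERY slot of devices_checked in place, retyping the list from
-- Option String to String; ported with a same-length String buffer (`devices`) whose initial
-- contents are all overwritten.
def devices_mark (devices : List String) (existing_devices : List String) : List String :=
  let devices_checked := devices_check devices existing_devices
  (PySem.List.enumerate devices_checked 0).foldl
    (fun (acc : List String) p =>
      PySem.List.pySetD acc p.1 (if p.2 ≠ none then "__1__" else "__0__"))
    devices

-- ===== PORT B =====
def devices_mark_alt (devices : List String) (existing_devices : List String) : List String :=
  devices.map (fun d => if d ∈ existing_devices then "__1__" else "__0__")

-- ===== PRECONDITION & SPEC =====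
def Spec_devices_mark (devices : List String) (existing_devices : List String) (out : List String) : Prop := out = devices_mark_alt devices existing_devices
instance (devices : List String) (existing_devices : List String) (out : List String) : Decidable (Spec_devices_mark devices existing_devices out) := by unfold Spec_devices_mark; infer_instance

-- ===== CLAIM (what is proved, stated in full; the proofs are below) =====
def Claim_equal_devices_mark : Prop := ∀ (devices : List String) (existing_devices : List String), Dom_devices_mark devices existing_devices → Spec_devices_mark devices existing_devices (devices_mark devices existing_devices)

-- ===== LEMMAS AND PROOFS =====

theorem pv_set_append_cons {β : Type} (pre : List β) (x v : β) (t : List β) :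
    (pre ++ x :: t).set pre.length v = pre ++ v :: t := by
  induction pre with
  | nil => simp
  | cons h tl ih => simp [ih]

-- A conditional in-place-set loop over an enumerated list equals a map.
theorem pv_fold_cond_set {α β : Type} (c : α → Bool) (g r : α → β)
    (l : List α) : ∀ (pre : List β),
    (PySem.List.enumerate l (pre.length : Int)).foldl
      (fun acc p => if c p.2 then PySem.List.pySetD acc p.1 (g p.2) else acc)
      (pre ++ l.map r)
    = pre ++ l.map (fun x => if c x then g x else r x) := by
  induction l with
  | nil => intro pre; simp [PySem.List.enumerate_nil]
  | cons x xs ih =>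
    intro pre
    rw [PySem.List.enumerate_cons]
    simp only [List.foldl_cons, List.map_cons]
    have hset : PySem.List.pySetD (pre ++ r x :: xs.map r) (pre.length : Int) (g x)
        = pre ++ g x :: xs.map r := by
      simp only [PySem.List.pySetD_natCast]
      exact pv_set_append_cons pre (r x) (g x) (xs.map r)
    by_cases hc : c x
    · rw [if_pos hc, hset]
      have := ih (pre ++ [g x])
      simp only [List.append_assoc, List.singleton_append, List.length_append,
        List.length_cons, List.length_nil] at this
      rw [show ((pre.length : Int) + 1) = ((pre.length + 1 : Nat) : Int) by push_cast; ring]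
      simpa [hc] using this
    · rw [if_neg hc]
      have := ih (pre ++ [r x])
      simp only [List.append_assoc, List.singleton_append, List.length_append,
        List.length_cons, List.length_nil] at this
      rw [show ((pre.length : Int) + 1) = ((pre.length + 1 : Nat) : Int) by push_cast; ring]
      simpa [hc] using this

-- An unconditional set loop overwrites every slot: the initial buffer only matters by length.
theorem pv_fold_set_all {α β : Type} (g : α → β)
    (l : List α) : ∀ (pre rest : List β), rest.length = l.length →
    (PySem.List.enumerate l (pre.length : Int)).foldl
      (fun acc p => PySem.List.pySetD acc p.1 (g p.2))
      (pre ++ rest)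
    = pre ++ l.map g := by
  induction l with
  | nil => intro pre rest h; simp at h; simp [PySem.List.enumerate_nil, h]
  | cons x xs ih =>
    intro pre rest h
    cases rest with
    | nil => simp at h
    | cons b bs =>
      simp only [List.length_cons, Nat.succ_inj] at h
      rw [PySem.List.enumerate_cons]
      simp only [List.foldl_cons, List.map_cons]
      have hset : PySem.List.pySetD (pre ++ b :: bs) (pre.length : Int) (g x)
          = pre ++ g x :: bs := by
        simp only [PySem.List.pySetD_natCast]
        exact pv_set_append_cons pre b (g x) bs
      rw [hset]
      have := ih (pre ++ [g x]) bs (by simpa using h)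
      simp only [List.append_assoc, List.singleton_append, List.length_append,
        List.length_cons, List.length_nil] at this
      rw [show ((pre.length : Int) + 1) = ((pre.length + 1 : Nat) : Int) by push_cast; ring]
      simpa using this

theorem devices_check_eq (devices existing_devices : List String) :
    devices_check devices existing_devices
      = devices.map (fun d => if d ∉ existing_devices then none else some d) := by
  unfold devices_check
  have := pv_fold_cond_set (fun d => decide (d ∉ existing_devices)) (fun _ => none) some
    devices ([] : List (Option String))
  simpa using this

-- ===== VERDICT (by name: the statement is the Claim_ definition above) =====
theorem devices_mark_spec : Claim_equal_devices_mark := by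
  intro devices existing_devices _
  show devices_mark devices existing_devices = devices_mark_alt devices existing_devices
  unfold devices_mark devices_mark_alt
  rw [devices_check_eq]
  have := pv_fold_set_all (fun (j : Option String) => if j ≠ none then "__1__" else "__0__")
    (devices.map (fun d => if d ∉ existing_devices then none else some d))
    ([] : List String) devices (by simp)
  simp only [List.nil_append, List.length_nil, Nat.cast_zero] at this
  rw [this, List.map_map]
  refine List.map_congr_left ?_
  intro d _
  by_cases hd : d ∈ existing_devices <;> simp [hd]
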